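-- pv_equiv track=rewrite | github.com/Damiru2112/PairsTradingStratMain | app.py | get_pair_blocking_status
-- ===== SOURCE A (Python) =====
-- def get_pair_blocking_status(pair: str, raw_issues: list) -> tuple:
--     """
--     Determine if a pair is currently blocked and why.
--     Returns (is_blocked: bool, reason: str or None)
--     Uses same logic as Trade Candidates.
--     """
--     # System/Data red issues block ALL pairs
--     for issue in raw_issues:
--         if issue.get("severity") == "red":
--             if issue.get("type") == "system":
--                 return True, "System"
--             if issue.get("type") == "data":
--                 return True, "Data"
--
--     # Pair-specific risk red issues
--     for issue in raw_issues:
--         if issue.get("pair") == pair and issue.get("type") == "risk" and issue.get("severity") == "red":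
--             return True, "Risk"
--
--     return False, None
-- ===== SOURCE B (Python) =====
-- def get_pair_blocking_status(pair: str, raw_issues: list) -> tuple:
--     """Single pass: system/data red issues return immediately; a matching red
--     risk issue only sets a flag, resolved after the scan (so system/data
--     anywhere in the list still take priority)."""
--     found_risk = False
--     for issue in raw_issues:
--         if issue.get("severity") == "red":
--             t = issue.get("type")
--             if t == "system":
--                 return True, "System"
--             if t == "data":
--                 return True, "Data"
--             if t == "risk" and issue.get("pair") == pair:
--                 found_risk = True
--     return (True, "Risk") if found_risk else (False, None)
-- ===== Notes on version B (the rewrite author's own statement) =====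
-- stated objective: simpler
-- what changed: Replaced A's two separate passes over raw_issues by one single pass that returns immediately on red system/data issues and defers a matched red risk issue via a flag resolved after the loop.
import Mathlib
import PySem

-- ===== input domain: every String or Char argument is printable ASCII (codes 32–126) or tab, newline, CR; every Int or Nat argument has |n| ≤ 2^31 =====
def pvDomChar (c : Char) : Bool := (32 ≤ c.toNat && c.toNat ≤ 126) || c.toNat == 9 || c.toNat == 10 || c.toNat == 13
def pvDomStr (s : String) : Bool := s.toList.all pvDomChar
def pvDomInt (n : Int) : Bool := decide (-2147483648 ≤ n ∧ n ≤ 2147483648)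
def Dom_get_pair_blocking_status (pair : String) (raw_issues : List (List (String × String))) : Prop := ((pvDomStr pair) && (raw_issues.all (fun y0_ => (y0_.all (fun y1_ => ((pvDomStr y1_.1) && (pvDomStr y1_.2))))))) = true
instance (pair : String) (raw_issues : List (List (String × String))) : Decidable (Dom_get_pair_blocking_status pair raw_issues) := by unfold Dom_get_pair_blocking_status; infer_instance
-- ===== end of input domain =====

-- B merges A's two passes over raw_issues into one pass with a deferred risk flag (objective: simpler); same return value.
-- ===== PORT A =====
def pvFirstPass (issues : List (List (String × String))) : Option (Bool × Option String) :=
  match issues with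
  | [] => none
  | issue :: rest =>
    if (PySem.Dict.mk issue).get? "severity" = some "red" then
      if (PySem.Dict.mk issue).get? "type" = some "system" then some (true, some "System")
      else if (PySem.Dict.mk issue).get? "type" = some "data" then some (true, some "Data")
      else pvFirstPass rest
    else pvFirstPass rest

def pvSecondPass (pair : String) (issues : List (List (String × String))) : Bool × Option String :=
  match issues with
  | [] => (false, none)
  | issue :: rest =>
    if (PySem.Dict.mk issue).get? "pair" = some pair ∧ (PySem.Dict.mk issue).get? "type" = some "risk" ∧ (PySem.Dict.mk issue).get? "severity" = some "red" then
      (true, some "Risk")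
    else pvSecondPass pair rest

def get_pair_blocking_status (pair : String) (raw_issues : List (List (String × String))) : Bool × Option String :=
  match pvFirstPass raw_issues with
  | some r => r
  | none => pvSecondPass pair raw_issues


-- ===== PORT B =====
def pvOnePass (pair : String) (found_risk : Bool) (issues : List (List (String × String))) : Bool × Option String :=
  match issues with
  | [] => if found_risk then (true, some "Risk") else (false, none)
  | issue :: rest =>
    if (PySem.Dict.mk issue).get? "severity" = some "red" then
      let t := (PySem.Dict.mk issue).get? "type"
      if t = some "system" then (true, some "System")
      else if t = some "data" then (true, some "Data")
      else if t = some "risk" ∧ (PySem.Dict.mk issue).get? "pair" = some pair then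
        pvOnePass pair true rest
      else pvOnePass pair found_risk rest
    else pvOnePass pair found_risk rest

def get_pair_blocking_status_alt (pair : String) (raw_issues : List (List (String × String))) : Bool × Option String :=
  pvOnePass pair false raw_issues


-- ===== PRECONDITION & SPEC =====
def Spec_get_pair_blocking_status (pair : String) (raw_issues : List (List (String × String))) (out : Bool × Option String) : Prop := out = get_pair_blocking_status_alt pair raw_issues
instance (pair : String) (raw_issues : List (List (String × String))) (out : Bool × Option String) : Decidable (Spec_get_pair_blocking_status pair raw_issues out) := by unfold Spec_get_pair_blocking_status; infer_instance

-- ===== CLAIM (what is proved, stated in full; the proofs are below) =====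
def Claim_equal_get_pair_blocking_status : Prop := ∀ (pair : String) (raw_issues : List (List (String × String))), Dom_get_pair_blocking_status pair raw_issues → Spec_get_pair_blocking_status pair raw_issues (get_pair_blocking_status pair raw_issues)

-- ===== LEMMAS AND PROOFS =====


theorem pvOnePass_eq (pair : String) (issues : List (List (String × String))) :
    ∀ found : Bool, pvOnePass pair found issues =
      match pvFirstPass issues with
      | some r => r
      | none => if found then (true, some "Risk") else pvSecondPass pair issues := by
  induction issues with
  | nil => intro found; simp [pvOnePass, pvFirstPass, pvSecondPass]
  | cons issue rest ih =>
    intro found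
    by_cases hs : (PySem.Dict.mk issue).get? "severity" = some "red"
    · by_cases hsys : (PySem.Dict.mk issue).get? "type" = some "system"
      · simp [pvOnePass, pvFirstPass, hs, hsys]
      · by_cases hdat : (PySem.Dict.mk issue).get? "type" = some "data"
        · simp [pvOnePass, pvFirstPass, hs, hsys, hdat]
        · by_cases hrisk : (PySem.Dict.mk issue).get? "type" = some "risk" ∧ (PySem.Dict.mk issue).get? "pair" = some pair
          · simp only [pvOnePass]
            rw [if_pos hs]
            simp only [if_neg hsys, if_neg hdat, if_pos hrisk]
            rw [ih true]
            have h2 : (PySem.Dict.mk issue).get? "pair" = some pair ∧ (PySem.Dict.mk issue).get? "type" = some "risk" ∧ (PySem.Dict.mk issue).get? "severity" = some "red" := ⟨hrisk.2, hrisk.1, hs⟩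
            simp only [pvFirstPass, pvSecondPass]
            rw [if_pos hs, if_neg hsys, if_neg hdat, if_pos h2]
            cases pvFirstPass rest <;> simp
          · simp only [pvOnePass]
            rw [if_pos hs]
            simp only [if_neg hsys, if_neg hdat, if_neg hrisk]
            rw [ih found]
            have h2 : ¬ ((PySem.Dict.mk issue).get? "pair" = some pair ∧ (PySem.Dict.mk issue).get? "type" = some "risk" ∧ (PySem.Dict.mk issue).get? "severity" = some "red") := by
              intro h; exact hrisk ⟨h.2.1, h.1⟩
            simp only [pvFirstPass, pvSecondPass]
            rw [if_pos hs, if_neg hsys, if_neg hdat, if_neg h2]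
    · simp only [pvOnePass]
      rw [if_neg hs, ih found]
      have h2 : ¬ ((PySem.Dict.mk issue).get? "pair" = some pair ∧ (PySem.Dict.mk issue).get? "type" = some "risk" ∧ (PySem.Dict.mk issue).get? "severity" = some "red") := by
        intro h; exact hs h.2.2
      simp only [pvFirstPass, pvSecondPass]
      rw [if_neg hs, if_neg h2]

-- ===== VERDICT (by name: the statement is the Claim_ definition above) =====
theorem get_pair_blocking_status_spec : Claim_equal_get_pair_blocking_status := by
  intro pair raw_issues _
  unfold Spec_get_pair_blocking_status get_pair_blocking_status get_pair_blocking_status_alt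
  rw [pvOnePass_eq pair raw_issues false]
  cases pvFirstPass raw_issues <;> simp
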